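-- pv_equiv track=rewrite | github.com/cmgjox7/- | 网评文本的有效性分析.py | detect_duplicate_comments
-- ===== SOURCE A (Python) =====
-- def detect_duplicate_comments(comments):
--     duplicate_comments = set()
--     unique_comments = set()
--     for comment in comments:
--         if comment in unique_comments:
--             duplicate_comments.add(comment)
--         else:
--             unique_comments.add(comment)
--     return duplicate_comments
-- ===== SOURCE B (Python) =====
-- def detect_duplicate_comments(comments):
--     # Two-pass: record each comment's first-occurrence index, then collect every
--     # comment that occurs at a position other than its first occurrence.
--     first = {}
--     for i, c in enumerate(comments):
--         first.setdefault(c, i)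
--     return {c for i, c in enumerate(comments) if first[c] != i}
-- ===== Notes on version B (the rewrite author's own statement) =====
-- stated objective: alternative
-- what changed: A's single online loop maintaining two sets (seen vs duplicate) is replaced by a two-pass count-free scheme: pass one records each comment's first-occurrence index in a dict via setdefault, pass two collects every comment whose position differs from its first occurrence.
import Mathlib
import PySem

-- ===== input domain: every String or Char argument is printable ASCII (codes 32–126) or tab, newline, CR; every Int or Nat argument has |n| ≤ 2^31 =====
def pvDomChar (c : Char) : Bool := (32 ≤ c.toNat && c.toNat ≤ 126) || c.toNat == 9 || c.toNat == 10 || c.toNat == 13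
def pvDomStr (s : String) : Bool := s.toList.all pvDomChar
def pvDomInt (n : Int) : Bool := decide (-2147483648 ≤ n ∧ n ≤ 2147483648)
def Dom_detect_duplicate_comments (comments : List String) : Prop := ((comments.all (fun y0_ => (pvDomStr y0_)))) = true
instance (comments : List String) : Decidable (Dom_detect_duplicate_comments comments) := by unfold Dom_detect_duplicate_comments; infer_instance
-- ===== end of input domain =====

-- B replaces A's online two-set (seen/duplicate) state machine by a two-pass scheme: a first pass
-- records each comment's first-occurrence index in a dict, a second pass collects every comment not
-- sitting at its first occurrence (objective: alternative decomposition, same cost).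

-- ===== PORT A =====
def detect_duplicate_comments (comments : List String) : List String :=
  (comments.foldl
    (fun (st : PySem.Set String × PySem.Set String) comment =>
      if PySem.Set.contains st.2 comment then
        (PySem.Set.add st.1 comment, st.2)
      else
        (st.1, PySem.Set.add st.2 comment))
    (PySem.Set.empty, PySem.Set.empty)).1

-- ===== PORT B =====
-- first pass of Source B: first.setdefault(c, i) over enumerate(comments)
def ddcFirst (comments : List String) : PySem.Dict String Int :=
  (PySem.List.enumerate comments).foldl
    (fun d p => d.setdefault p.2 p.1) PySem.Dict.empty

def detect_duplicate_comments_alt (comments : List String) : List String :=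
  let first := ddcFirst comments
  -- second pass of Source B: {c for i, c in enumerate(comments) if first[c] != i};
  -- first[c] never raises here (every c was inserted by the first pass), so getD with an
  -- unused default ports the lookup exactly.
  (PySem.List.enumerate comments).foldl
    (fun s p => if first.getD p.2 (-1) ≠ p.1 then PySem.Set.add s p.2 else s)
    PySem.Set.empty

-- ===== PRECONDITION & SPEC =====
def Spec_detect_duplicate_comments (comments : List String) (out : List String) : Prop := out = detect_duplicate_comments_alt comments
instance (comments : List String) (out : List String) : Decidable (Spec_detect_duplicate_comments comments out) := by unfold Spec_detect_duplicate_comments; infer_instance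

-- ===== CLAIM (what is proved, stated in full; the proofs are below) =====
def Claim_equal_detect_duplicate_comments : Prop := ∀ (comments : List String), Dom_detect_duplicate_comments comments → Spec_detect_duplicate_comments comments (detect_duplicate_comments comments)

-- ===== LEMMAS AND PROOFS =====

-- Reference function: walking xs with already-processed prefix `pre`, add c to the set iff c occurred earlier.
def ddcMark (pre xs : List String) (d : PySem.Set String) : PySem.Set String :=
  match xs with
  | [] => d
  | c :: rest => ddcMark (pre ++ [c]) rest (if pre.contains c then PySem.Set.add d c else d)

-- A's loop computes ddcMark, with the seen-set tracking membership in the processed prefix.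
lemma ddc_A_fold (xs : List String) :
    ∀ (pre : List String) (d u : PySem.Set String),
    (∀ c, c ∈ u ↔ c ∈ pre) →
    (xs.foldl
      (fun (st : PySem.Set String × PySem.Set String) comment =>
        if PySem.Set.contains st.2 comment then
          (PySem.Set.add st.1 comment, st.2)
        else
          (st.1, PySem.Set.add st.2 comment)) (d, u)).1 = ddcMark pre xs d := by
  induction xs with
  | nil => intro pre d u h; simp [ddcMark]
  | cons c rest ih =>
    intro pre d u h
    have hcont : PySem.Set.contains u c = pre.contains c := by
      simp [PySem.Set.contains, h c]
    simp only [List.foldl_cons, ddcMark, hcont]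
    cases hpc : pre.contains c with
    | true =>
      have hcp : c ∈ pre := by simpa using hpc
      simp only [if_pos]
      refine ih (pre ++ [c]) _ u ?_
      intro c'
      rw [h c']
      simp only [List.mem_append, List.mem_singleton]
      constructor
      · exact Or.inl
      · rintro (hx | rfl)
        · exact hx
        · exact hcp
    | false =>
      have hcp : c ∉ u := by rw [h c]; simpa using hpc
      simp only [Bool.false_eq_true, if_false]
      refine ih (pre ++ [c]) _ _ ?_
      intro c'
      have hadd : PySem.Set.add u c = u ++ [c] := by
        simp [PySem.Set.add]
        intro hmem
        exact absurd hmem hcp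
      rw [hadd]
      simp [List.mem_append, h c']

lemma ddc_setdefault_eq (d : PySem.Dict String Int) (k : String) (v : Int) :
    d.setdefault k v = if d.contains k then d else d.insert k v := by
  by_cases h : d.contains k = true
  · simp [PySem.Dict.setdefault, h]
  · simp only [PySem.Dict.setdefault, h, Bool.false_eq_true, if_false]
    apply PySem.Dict.ext
    rw [PySem.Dict.items_insert]
    simp [h]

-- Characterisation of the first pass: it records the index of the first occurrence.
lemma ddc_first_fold (xs : List String) :
    ∀ (s : Int) (d : PySem.Dict String Int) (c : String),
    ((PySem.List.enumerate xs s).foldl (fun d p => d.setdefault p.2 p.1) d).get? c =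
      if d.contains c then d.get? c
      else if c ∈ xs then some (s + (xs.idxOf c : Int)) else none := by
  induction xs with
  | nil =>
    intro s d c
    simp only [PySem.List.enumerate_nil, List.foldl_nil, List.not_mem_nil, if_false]
    by_cases h : d.contains c = true
    · simp [h]
    · simp only [h, Bool.false_eq_true, if_false]
      rw [PySem.Dict.get?_eq_none_iff_contains]
      simpa using h
  | cons c0 rest ih =>
    intro s d c
    rw [PySem.List.enumerate_cons]
    simp only [List.foldl_cons]
    rw [ddc_setdefault_eq]
    by_cases h0 : d.contains c0 = true
    · rw [if_pos h0, ih]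
      by_cases hc : d.contains c = true
      · simp [hc]
      · have hne : c ≠ c0 := fun he => hc (he ▸ h0)
        simp only [hc, Bool.false_eq_true, if_false, List.mem_cons, hne, false_or]
        by_cases hm : c ∈ rest
        · have hx : (c0 :: rest).idxOf c = rest.idxOf c + 1 := by simp [Ne.symm hne]
          rw [if_pos hm, if_pos hm, hx]
          push_cast
          ring_nf
        · simp [hm]
    · rw [if_neg h0, ih]
      by_cases hc : c = c0
      · subst hc
        simp only [PySem.Dict.contains_insert_self, if_pos, PySem.Dict.get?_insert_self]
        simp [h0, List.idxOf_cons_self]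
      · have hbe : (c == c0) = false := by simpa using hc
        rw [PySem.Dict.contains_insert, PySem.Dict.get?_insert]
        simp only [hbe, Bool.false_or, hc, if_false, List.mem_cons, false_or]
        by_cases hm : c ∈ rest
        · by_cases hdc : d.contains c = true
          · simp [hdc]
          · have hx : (c0 :: rest).idxOf c = rest.idxOf c + 1 := by simp [Ne.symm hc]
            simp only [hdc, Bool.false_eq_true, if_false, if_pos hm, hx]
            push_cast
            ring_nf
        · simp [hm]

-- The test of B's second pass is exactly "c occurred earlier".
lemma ddc_cond (pre rest : List String) (c : String) :
    (ddcFirst (pre ++ c :: rest)).getD c (-1) ≠ (pre.length : Int) ↔ c ∈ pre := by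
  unfold ddcFirst
  rw [PySem.Dict.getD_eq_get?_getD, ddc_first_fold]
  rw [if_neg (by simp [PySem.Dict.contains_empty])]
  rw [if_pos (show c ∈ pre ++ c :: rest by simp)]
  simp only [Option.getD_some, ne_eq, zero_add]
  by_cases hm : c ∈ pre
  · rw [List.idxOf_append_of_mem hm]
    have hlt := List.idxOf_lt_length_of_mem hm
    simp only [hm, iff_true]
    intro he
    omega
  · rw [List.idxOf_append_of_notMem hm, List.idxOf_cons_self]
    simp only [hm, iff_false, not_not]
    push_cast
    omega

-- B's second pass computes ddcMark as well.
lemma ddc_B_fold (comments : List String) (xs : List String) :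
    ∀ (pre : List String) (s : PySem.Set String),
    comments = pre ++ xs →
    ((PySem.List.enumerate xs (pre.length : Int)).foldl
      (fun s p => if (ddcFirst comments).getD p.2 (-1) ≠ p.1 then PySem.Set.add s p.2 else s)
      s) = ddcMark pre xs s := by
  induction xs with
  | nil => intro pre s _; simp [PySem.List.enumerate_nil, ddcMark]
  | cons c rest ih =>
    intro pre s hpre
    rw [PySem.List.enumerate_cons]
    simp only [List.foldl_cons, ddcMark]
    have hcond : ((ddcFirst comments).getD c (-1) ≠ (pre.length : Int)) ↔ c ∈ pre := by
      rw [hpre]; exact ddc_cond pre rest c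
    have hlen : (pre.length : Int) + 1 = ((pre ++ [c]).length : Int) := by
      simp
    have hpre' : comments = (pre ++ [c]) ++ rest := by
      rw [hpre, List.append_assoc]; rfl
    by_cases hm : c ∈ pre
    · rw [if_pos (hcond.mpr hm), if_pos (by simpa using hm), hlen]
      exact ih (pre ++ [c]) _ hpre'
    · rw [if_neg (fun h => hm (hcond.mp h)),
        if_neg (by simpa using hm), hlen]
      exact ih (pre ++ [c]) _ hpre'

-- ===== VERDICT (by name: the statement is the Claim_ definition above) =====
theorem detect_duplicate_comments_spec : Claim_equal_detect_duplicate_comments := by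
  intro comments _
  unfold Spec_detect_duplicate_comments detect_duplicate_comments detect_duplicate_comments_alt
  rw [ddc_A_fold comments [] PySem.Set.empty PySem.Set.empty (by intro c; simp [PySem.Set.empty])]
  have h0 : (0 : Int) = ((([] : List String)).length : Int) := by simp
  show ddcMark [] comments [] =
    (PySem.List.enumerate comments 0).foldl
      (fun s p => if (ddcFirst comments).getD p.2 (-1) ≠ p.1 then PySem.Set.add s p.2 else s)
      PySem.Set.empty
  rw [h0, ddc_B_fold comments comments [] PySem.Set.empty rfl]
  rfl
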